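-- pv_equiv track=rewrite | github.com/TiagoMarante/Coding-Interviews | Find all The Rectangules In the Dots/find_number_of_rectangles.py | all_combination_4
-- ===== SOURCE A (Python) =====
-- from itertools import combinations
--
-- def rectangule(xy_points):
-- 	a_x = xy_points[0][0]
-- 	b_x = xy_points[1][0]
-- 	c_x = xy_points[2][0]
-- 	d_x = xy_points[3][0]
--
-- 	e_y = xy_points[0][1]
-- 	f_y = xy_points[1][1]
-- 	g_y = xy_points[2][1]
-- 	h_y = xy_points[3][1]
--
-- 	if (a_x == b_x == c_x == d_x):
-- 		if(e_y in(f_y,g_y,h_y) and (f_y in (e_y,g_y,h_y)) and (g_y in (e_y,f_y,h_y)) and (h_y in (e_y,f_y,g_y))):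
-- 			return 1
-- 	elif (a_x == b_x and c_x == d_x):
-- 		if(e_y in(f_y,g_y,h_y) and (f_y in (e_y,g_y,h_y)) and (g_y in (e_y,f_y,h_y)) and (h_y in (e_y,f_y,g_y))):
-- 			return 1
-- 	elif (a_x == d_x and c_x == b_x):
-- 		if(e_y in(f_y,g_y,h_y) and (f_y in (e_y,g_y,h_y)) and (g_y in (e_y,f_y,h_y)) and (h_y in (e_y,f_y,g_y))):
-- 			return 1
-- 	elif (a_x == c_x and d_x == b_x):
-- 		if(e_y in(f_y,g_y,h_y) and (f_y in (e_y,g_y,h_y)) and (g_y in (e_y,f_y,h_y)) and (h_y in (e_y,f_y,g_y))):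
-- 			return 1
--
-- def all_combination_4(xy):
-- 	output = sum([list(map(list, combinations(xy, i))) for i in range(len(xy) + 1)], [])
-- 	c = 0
-- 	soma = 0
-- 	for i in output:
-- 		if (len(i) == 4):
-- 			c = rectangule(i)
-- 			if (c != None):
-- 				soma += 1
-- 	return soma
-- ===== SOURCE B (Python) =====
-- from itertools import combinations
--
-- def all_combination_4(xy):
--     def pairable(a, b, c, d):
--         return (a == b and c == d) or (a == c and b == d) or (a == d and b == c)
--     soma = 0
--     for p, q, r, s in combinations(xy, 4):
--         if pairable(p[0], q[0], r[0], s[0]) and pairable(p[1], q[1], r[1], s[1]):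
--             soma += 1
--     return soma
-- ===== Notes on version B (the rewrite author's own statement) =====
-- stated objective: faster
-- what changed: B iterates combinations(xy, 4) directly with one symmetric pairing test per quadruple instead of materialising the whole power set of xy and filtering it for length-4 subsets through the branchy rectangule helper.
import Mathlib
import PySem

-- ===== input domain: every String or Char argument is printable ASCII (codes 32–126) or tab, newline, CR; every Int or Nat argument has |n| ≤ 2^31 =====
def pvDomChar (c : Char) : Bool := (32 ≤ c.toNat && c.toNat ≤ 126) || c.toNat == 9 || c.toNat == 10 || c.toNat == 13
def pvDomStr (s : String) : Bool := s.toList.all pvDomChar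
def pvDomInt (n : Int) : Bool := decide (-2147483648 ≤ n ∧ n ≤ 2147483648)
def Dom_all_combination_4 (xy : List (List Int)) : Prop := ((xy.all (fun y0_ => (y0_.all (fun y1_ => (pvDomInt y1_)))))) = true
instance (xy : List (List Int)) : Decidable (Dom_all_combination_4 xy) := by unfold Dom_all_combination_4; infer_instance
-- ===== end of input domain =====

-- B iterates the 4-element combinations directly with a symmetric pairing test instead of
-- enumerating the whole power set and filtering by length (asymptotic speed-up, O(n^4) vs O(2^n)).

-- shared helper: itertools.combinations(xs, k) in Python's (lexicographic-by-index) order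
def pvCombs : Nat → List (List Int) → List (List (List Int))
  | 0, _ => [[]]
  | _ + 1, [] => []
  | k + 1, x :: rest => ((pvCombs k rest).map (fun c => x :: c)) ++ pvCombs (k + 1) rest

-- ===== PORT A =====
-- indexing is via pyGetD: exact under Pre_ (Python raises IndexError outside it)
def rectangule (xy_points : List (List Int)) : Option Int :=
  let a_x := PySem.List.pyGetD (PySem.List.pyGetD xy_points 0 []) 0 0
  let b_x := PySem.List.pyGetD (PySem.List.pyGetD xy_points 1 []) 0 0
  let c_x := PySem.List.pyGetD (PySem.List.pyGetD xy_points 2 []) 0 0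
  let d_x := PySem.List.pyGetD (PySem.List.pyGetD xy_points 3 []) 0 0
  let e_y := PySem.List.pyGetD (PySem.List.pyGetD xy_points 0 []) 1 0
  let f_y := PySem.List.pyGetD (PySem.List.pyGetD xy_points 1 []) 1 0
  let g_y := PySem.List.pyGetD (PySem.List.pyGetD xy_points 2 []) 1 0
  let h_y := PySem.List.pyGetD (PySem.List.pyGetD xy_points 3 []) 1 0
  -- the y-membership test Python repeats verbatim in every branch
  let ycond : Bool :=
    (e_y == f_y || e_y == g_y || e_y == h_y) && (f_y == e_y || f_y == g_y || f_y == h_y) &&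
    (g_y == e_y || g_y == f_y || g_y == h_y) && (h_y == e_y || h_y == f_y || h_y == g_y)
  if a_x == b_x && b_x == c_x && c_x == d_x then
    (if ycond then some 1 else none)
  else if a_x == b_x && c_x == d_x then
    (if ycond then some 1 else none)
  else if a_x == d_x && c_x == b_x then
    (if ycond then some 1 else none)
  else if a_x == c_x && d_x == b_x then
    (if ycond then some 1 else none)
  else none

def all_combination_4 (xy : List (List Int)) : Int :=
  let output := (List.range (xy.length + 1)).foldl (fun acc i => acc ++ pvCombs i xy) []
  output.foldl (fun soma i =>
    if i.length == 4 then
      (if rectangule i ≠ none then soma + 1 else soma)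
    else soma) (0 : Int)

-- ===== PORT B =====
def pvPairable (a b c d : Int) : Bool :=
  (a == b && c == d) || (a == c && b == d) || (a == d && b == c)

-- the tuple unpacking 'for p, q, r, s in combinations(xy, 4)' plus the guard
def pvQuadOK (t : List (List Int)) : Bool :=
  match t with
  | [p, q, r, s] =>
      pvPairable (PySem.List.pyGetD p 0 0) (PySem.List.pyGetD q 0 0)
                 (PySem.List.pyGetD r 0 0) (PySem.List.pyGetD s 0 0) &&
      pvPairable (PySem.List.pyGetD p 1 0) (PySem.List.pyGetD q 1 0)
                 (PySem.List.pyGetD r 1 0) (PySem.List.pyGetD s 1 0)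
  | _ => false

def all_combination_4_alt (xy : List (List Int)) : Int :=
  (pvCombs 4 xy).foldl (fun soma t => if pvQuadOK t then soma + 1 else soma) (0 : Int)

-- ===== PRECONDITION & SPEC =====
-- Pre_ excludes exactly the inputs where Python A raises IndexError: a point with fewer
-- than two coordinates inside some 4-element combination (i.e. when len(xy) >= 4).
def Pre_all_combination_4 (xy : List (List Int)) : Prop :=
  xy.length < 4 ∨ ∀ p ∈ xy, 2 ≤ p.length
instance (xy : List (List Int)) : Decidable (Pre_all_combination_4 xy) := by
  unfold Pre_all_combination_4; infer_instance

def pvWitness_all_combination_4 : List (List Int) := [[0, 0], [0, 1], [1, 0], [1, 1]]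

def Spec_all_combination_4 (xy : List (List Int)) (out : Int) : Prop := out = all_combination_4_alt xy
instance (xy : List (List Int)) (out : Int) : Decidable (Spec_all_combination_4 xy out) := by unfold Spec_all_combination_4; infer_instance

-- ===== CLAIM (what is proved, stated in full; the proofs are below) =====
def Claim_equal_all_combination_4 : Prop := ∀ (xy : List (List Int)), Dom_all_combination_4 xy → Pre_all_combination_4 xy → Spec_all_combination_4 xy (all_combination_4 xy)

-- ===== LEMMAS AND PROOFS =====

-- every member of pvCombs k xs has length k
theorem pvCombs_length : ∀ (k : Nat) (xs : List (List Int)) (l : List (List Int)),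
    l ∈ pvCombs k xs → l.length = k := by
  intro k xs
  induction xs generalizing k with
  | nil => cases k <;> simp [pvCombs]
  | cons x rest ih =>
    cases k with
    | zero => simp [pvCombs]
    | succ k =>
      intro l hl
      simp only [pvCombs, List.mem_append, List.mem_map] at hl
      rcases hl with ⟨c, hc, rfl⟩ | hl
      · simp [ih k c hc]
      · exact ih (k + 1) l hl

theorem pvCombs_nil_of_lt : ∀ (k : Nat) (xs : List (List Int)),
    xs.length < k → pvCombs k xs = [] := by
  intro k xs
  induction xs generalizing k with
  | nil => cases k <;> simp [pvCombs]
  | cons x rest ih =>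
    cases k with
    | zero => simp
    | succ k =>
      intro h
      simp only [List.length_cons] at h
      simp [pvCombs, ih k (by omega), ih (k + 1) (by omega)]

-- A's counting loop is a countP
theorem foldlA_count : ∀ (l : List (List (List Int))) (s : Int),
    l.foldl (fun soma i =>
      if i.length == 4 then
        (if rectangule i ≠ none then soma + 1 else soma)
      else soma) s
    = s + (l.countP (fun i => i.length == 4 && decide (rectangule i ≠ none)) : Int) := by
  intro l
  induction l with
  | nil => simp
  | cons x t ih =>
    intro s
    simp only [List.foldl_cons, List.countP_cons, ih]
    by_cases h1 : x.length = 4 <;> by_cases h2 : rectangule x = none <;>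
      simp [h1, h2] <;> push_cast <;> omega

-- B's counting loop is a countP
theorem foldlB_count : ∀ (l : List (List (List Int))) (s : Int),
    l.foldl (fun soma t => if pvQuadOK t then soma + 1 else soma) s
    = s + (l.countP pvQuadOK : Int) := by
  intro l
  induction l with
  | nil => simp
  | cons x t ih =>
    intro s
    simp only [List.foldl_cons, List.countP_cons, ih]
    by_cases h : pvQuadOK x <;> simp [h] <;> push_cast <;> omega

-- countP of the fold of appends over range = sum of per-index countP
theorem countP_foldl_append (f : List (List Int) → Bool) (g : Nat → List (List (List Int))) :
    ∀ (l : List Nat) (acc : List (List (List Int))),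
    (l.foldl (fun acc i => acc ++ g i) acc).countP f
      = acc.countP f + (l.map (fun i => (g i).countP f)).sum := by
  intro l
  induction l with
  | nil => simp
  | cons i t ih =>
    intro acc
    simp only [List.foldl_cons, ih, List.map_cons, List.sum_cons, List.countP_append]
    omega

-- the branchy rectangule test equals the symmetric pairing test, pointwise over the 8 coordinates
theorem pred_core (ax bx cx dx ey fy gy hy : Int) :
    (decide ((( if ax == bx && bx == cx && cx == dx then
          (if (ey == fy || ey == gy || ey == hy) && (fy == ey || fy == gy || fy == hy) &&
              (gy == ey || gy == fy || gy == hy) && (hy == ey || hy == fy || hy == gy)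
           then some (1 : Int) else none)
        else if ax == bx && cx == dx then
          (if (ey == fy || ey == gy || ey == hy) && (fy == ey || fy == gy || fy == hy) &&
              (gy == ey || gy == fy || gy == hy) && (hy == ey || hy == fy || hy == gy)
           then some 1 else none)
        else if ax == dx && cx == bx then
          (if (ey == fy || ey == gy || ey == hy) && (fy == ey || fy == gy || fy == hy) &&
              (gy == ey || gy == fy || gy == hy) && (hy == ey || hy == fy || hy == gy)
           then some 1 else none)
        else if ax == cx && dx == bx then
          (if (ey == fy || ey == gy || ey == hy) && (fy == ey || fy == gy || fy == hy) &&
              (gy == ey || gy == fy || gy == hy) && (hy == ey || hy == fy || hy == gy)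
           then some 1 else none)
        else none) : Option Int) ≠ none))
    = (pvPairable ax bx cx dx && pvPairable ey fy gy hy) := by
  simp only [pvPairable]
  split_ifs <;> simp_all <;> omega

-- on length-4 lists A's loop predicate is pvQuadOK
theorem predA_eq_quadOK (l : List (List Int)) (hl : l.length = 4) :
    (l.length == 4 && decide (rectangule l ≠ none)) = pvQuadOK l := by
  match l, hl with
  | [p, q, r, s], _ =>
    have e0 : PySem.List.pyGetD ([p, q, r, s] : List (List Int)) (0 : Int) ([] : List Int) = p := rfl
    have e1 : PySem.List.pyGetD ([p, q, r, s] : List (List Int)) (1 : Int) ([] : List Int) = q := rfl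
    have e2 : PySem.List.pyGetD ([p, q, r, s] : List (List Int)) (2 : Int) ([] : List Int) = r := rfl
    have e3 : PySem.List.pyGetD ([p, q, r, s] : List (List Int)) (3 : Int) ([] : List Int) = s := rfl
    simp only [rectangule, e0, e1, e2, e3]
    have hlen : (([p, q, r, s] : List (List Int)).length == 4) = true := rfl
    rw [hlen, Bool.true_and, pred_core, pvQuadOK]

-- the per-index count vanishes except at i = 4
theorem countP_pvCombs (xy : List (List Int)) (i : Nat) :
    (pvCombs i xy).countP (fun l => l.length == 4 && decide (rectangule l ≠ none))
      = if i = 4 then (pvCombs 4 xy).countP pvQuadOK else 0 := by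
  by_cases h : i = 4
  · subst h
    simp only [if_pos]
    exact List.countP_congr
      (fun l hl => by rw [predA_eq_quadOK l (pvCombs_length 4 xy l hl)])
  · rw [if_neg h, List.countP_eq_zero]
    intro l hl
    have := pvCombs_length i xy l hl
    simp [this, h]

theorem sum_single : ∀ (n C : Nat),
    ((List.range n).map (fun i => if i = 4 then C else 0)).sum = if 4 < n then C else 0 := by
  intro n C
  induction n with
  | zero => simp
  | succ n ih =>
    rw [List.range_succ]
    simp only [List.map_append, List.sum_append, ih, List.map_cons, List.map_nil,
      List.sum_cons, List.sum_nil]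
    split_ifs <;> omega

-- ===== VERDICT (by name: the statement is the Claim_ definition above) =====
theorem all_combination_4_spec : Claim_equal_all_combination_4 := by
  intro xy _ _
  unfold Spec_all_combination_4 all_combination_4 all_combination_4_alt
  simp only [foldlA_count, foldlB_count, countP_foldl_append, List.countP_nil,
    countP_pvCombs, sum_single]
  by_cases h : 4 < xy.length + 1
  · simp [h]
  · have hnil : pvCombs 4 xy = [] := pvCombs_nil_of_lt 4 xy (by omega)
    simp [h, hnil]
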